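-- pv_equiv track=rewrite | github.com/Lummetry/ALLAN | tagger/crawler/EY_data/ey_preprocessing.py | generate_dict_label_occ_in_docs
-- ===== SOURCE A (Python) =====
-- def flatten_list(a):
--   return [item for sublist in a for item in sublist]
--
-- def generate_dict_label_occ_in_docs(labels):
--   """
--   Generates a dictionary containing the occurence of each label in
--   the final dataset.
--
--   Arguments: a list of lists of labels
--
--   Returns: a dictionary where keys are tags, and values are their occurence values
--
--   """
--   unqiue_labels  = list(set(flatten_list(labels)))
--   dictonary = {}
--   for i in labels:
--     for k in unqiue_labels:
--       if k in i:
--         try: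
--           dictonary[k] += 1
--         except:
--           dictonary[k] = 1
--
--   return dictonary
-- ===== SOURCE B (Python) =====
-- def generate_dict_label_occ_in_docs(labels):
--   # One pass over the documents: tally each document's deduplicated labels
--   # directly into a counter dict; no global unique-label list, no membership scan.
--   counts = {}
--   for doc in labels:
--     for lab in dict.fromkeys(doc):
--       counts[lab] = counts.get(lab, 0) + 1
--   return counts
-- ===== Notes on version B (the rewrite author's own statement) =====
-- stated objective: faster
-- what changed: Replaced the precomputed global unique-label list and the nested 'for each doc, for each unique label, membership test' scan by a single pass that tallies each document's own deduplicated labels into a counter dict.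
import Mathlib
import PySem

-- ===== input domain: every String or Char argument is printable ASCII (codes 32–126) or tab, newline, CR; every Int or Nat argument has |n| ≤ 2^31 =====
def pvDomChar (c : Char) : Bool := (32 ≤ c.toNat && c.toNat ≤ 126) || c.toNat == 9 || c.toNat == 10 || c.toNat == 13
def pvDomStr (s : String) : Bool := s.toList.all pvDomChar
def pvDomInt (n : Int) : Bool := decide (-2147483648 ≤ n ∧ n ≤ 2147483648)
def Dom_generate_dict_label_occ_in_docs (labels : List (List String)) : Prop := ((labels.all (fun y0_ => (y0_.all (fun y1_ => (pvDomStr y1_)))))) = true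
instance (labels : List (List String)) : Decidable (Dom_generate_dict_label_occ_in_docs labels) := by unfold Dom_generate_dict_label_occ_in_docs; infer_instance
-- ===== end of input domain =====

-- B drops A's global unique-label list and nested membership scan: it tallies each
-- document's deduplicated labels into a counter dict in a single pass (faster).
-- NOTE on the A port: CPython iterates `list(set(...))` in hash order, which PySem does
-- not model; the port uses Set.ofList's first-occurrence order. The dict RESULT is the
-- same Python dict (dict == ignores key order); only the unmodelled key order differs.

-- ===== PORT A =====
def flatten_list (a : List (List String)) : List String :=
  a.flatMap (fun sublist => sublist)

def generate_dict_label_occ_in_docs (labels : List (List String)) : List (String × Int) :=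
  let unqiue_labels : PySem.Set String := PySem.Set.ofList (flatten_list labels)
  let dictonary : PySem.Dict String Int := PySem.Dict.empty
  let dictonary := labels.foldl (fun dct i =>
    unqiue_labels.foldl (fun dct2 k =>
      if k ∈ i then
        -- try: dictonary[k] += 1 / except: dictonary[k] = 1
        match dct2.get? k with
        | some v => dct2.insert k (v + 1)
        | none   => dct2.insert k 1
      else dct2) dct) dictonary
  dictonary.items

-- ===== PORT B =====
def generate_dict_label_occ_in_docs_alt (labels : List (List String)) : List (String × Int) :=
  let counts := labels.foldl (fun counts doc =>
    (PySem.List.dedup doc).foldl (fun c lab =>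
      c.insert lab (c.getD lab 0 + 1)) counts) PySem.Dict.empty
  counts.items

-- ===== PRECONDITION & SPEC =====
def Spec_generate_dict_label_occ_in_docs (labels : List (List String)) (out : List (String × Int)) : Prop := out = generate_dict_label_occ_in_docs_alt labels
instance (labels : List (List String)) (out : List (String × Int)) : Decidable (Spec_generate_dict_label_occ_in_docs labels out) := by unfold Spec_generate_dict_label_occ_in_docs; infer_instance

-- ===== CLAIM (what is proved, stated in full; the proofs are below) =====
def Claim_equal_generate_dict_label_occ_in_docs : Prop := ∀ (labels : List (List String)), Dom_generate_dict_label_occ_in_docs labels → Spec_generate_dict_label_occ_in_docs labels (generate_dict_label_occ_in_docs labels)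

-- ===== LEMMAS AND PROOFS =====

theorem pvFlatten_append (p q : List (List String)) :
    flatten_list (p ++ q) = flatten_list p ++ flatten_list q := by
  simp [flatten_list]

-- A's try/except body is the getD-based increment
theorem pvStepA_eq (d : PySem.Dict String Int) (k : String) :
    (match d.get? k with
     | some v => d.insert k (v + 1)
     | none   => d.insert k 1) = d.insert k (d.getD k 0 + 1) := by
  cases h : d.get? k <;> simp [PySem.Dict.getD_eq_get?_getD, h]

-- A is Counter(per-doc filtered unique lists, concatenated)
theorem pvA_eq_counter (labels : List (List String)) :
    generate_dict_label_occ_in_docs labels =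
      (PySem.Dict.counter
        (labels.flatMap (fun i =>
          (PySem.Set.ofList (flatten_list labels)).filter (fun k => decide (k ∈ i))))).items := by
  unfold generate_dict_label_occ_in_docs
  dsimp only
  rw [← PySem.Dict.foldl_insert_getD_add_one_eq_counter, List.foldl_flatMap]
  congr 1
  apply PySem.List.foldl_congr_mem
  intro acc i _
  rw [← PySem.List.foldl_ite_eq_foldl_filter]
  apply PySem.List.foldl_congr_mem
  intro acc2 k _
  split_ifs
  · exact pvStepA_eq acc2 k
  · rfl

-- B is Counter(per-doc deduped lists, concatenated)
theorem pvB_eq_counter (labels : List (List String)) :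
    generate_dict_label_occ_in_docs_alt labels =
      (PySem.Dict.counter (labels.flatMap PySem.List.dedup)).items := by
  unfold generate_dict_label_occ_in_docs_alt
  rw [← PySem.Dict.foldl_insert_getD_add_one_eq_counter, List.foldl_flatMap]

-- updating by set(xs) is updating by xs
theorem pvUpdate_ofList (s : PySem.Set String) (xs : List String) :
    PySem.Set.update s (PySem.Set.ofList xs) = PySem.Set.update s xs := by
  rw [PySem.Set.update_eq_append_filter, PySem.Set.update_eq_append_filter,
    PySem.Set.ofList_ofList]

theorem pvUpdate_flatMap_dedup (l : List (List String)) (s : PySem.Set String) :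
    PySem.Set.update s (l.flatMap PySem.List.dedup) = PySem.Set.update s (flatten_list l) := by
  induction l generalizing s with
  | nil => rfl
  | cons i t ih =>
      simp only [flatten_list, List.flatMap_cons, PySem.Set.update_append,
        PySem.List.dedup_eq_ofList, pvUpdate_ofList]
      exact ih _

-- per-document dedup does not change the first-occurrence key order
theorem pvOfList_flatMap_dedup (labels : List (List String)) :
    PySem.Set.ofList (labels.flatMap PySem.List.dedup) =
      PySem.Set.ofList (flatten_list labels) := by
  rw [← PySem.Set.update_nil_left, ← PySem.Set.update_nil_left (flatten_list labels),
    pvUpdate_flatMap_dedup]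

-- key order step: the yet-unseen labels of the global unique list that occur in
-- document i are exactly i's new first occurrences, in i's own order
theorem pvKey (p rest : List (List String)) (i : List String) :
    PySem.Set.update (PySem.Set.ofList (flatten_list p))
        ((PySem.Set.ofList (flatten_list (p ++ i :: rest))).filter (fun k => decide (k ∈ i))) =
      PySem.Set.ofList (flatten_list (p ++ [i])) := by
  set S : PySem.Set String := PySem.Set.ofList (flatten_list p) with hS
  set N : List String := (PySem.Set.ofList i).filter (fun y => !(PySem.Set.contains S y)) with hN
  set M : List String := (PySem.Set.ofList (flatten_list rest)).filter
      (fun y => !(PySem.Set.contains (S ++ N) y)) with hM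
  have hu : PySem.Set.ofList (flatten_list (p ++ i :: rest)) = (S ++ N) ++ M := by
    have h : flatten_list (p ++ i :: rest) = (flatten_list p ++ i) ++ flatten_list rest := by
      simp [flatten_list]
    rw [h, PySem.Set.ofList_append, PySem.Set.ofList_append,
      PySem.Set.update_eq_append_filter, PySem.Set.update_eq_append_filter, hM, hN, hS]
  have hRHS : PySem.Set.ofList (flatten_list (p ++ [i])) = S ++ N := by
    rw [pvFlatten_append, PySem.Set.ofList_append, PySem.Set.update_eq_append_filter, hN, hS]
    simp [flatten_list]
  have hnodup : (((S ++ N) ++ M).filter (fun k => decide (k ∈ i))).Nodup := by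
    apply List.Nodup.filter
    rw [← hu]
    exact PySem.Set.nodup_ofList _
  rw [hu, hRHS, PySem.Set.update_eq_append_filter]
  rw [PySem.Set.ofList_eq_self_of_nodup _ hnodup]
  congr 1
  rw [List.filter_append, List.filter_append, List.filter_append, List.filter_append]
  have e1 : List.filter (fun y => !(PySem.Set.contains S y))
      (List.filter (fun k => decide (k ∈ i)) S) = [] := by
    rw [List.filter_eq_nil_iff]
    intro a ha
    have haS : a ∈ S := (List.mem_filter.mp ha).1
    simp [haS]
  have e2a : List.filter (fun k => decide (k ∈ i)) N = N := by
    rw [List.filter_eq_self]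
    intro a ha
    rw [hN, List.mem_filter, PySem.Set.mem_ofList] at ha
    simp [ha.1]
  have e2b : List.filter (fun y => !(PySem.Set.contains S y)) N = N := by
    rw [List.filter_eq_self]
    intro a ha
    rw [hN, List.mem_filter] at ha
    exact ha.2
  have e3a : List.filter (fun k => decide (k ∈ i)) M = [] := by
    rw [List.filter_eq_nil_iff]
    intro a ha
    rw [hM, List.mem_filter] at ha
    obtain ⟨_, hnc⟩ := ha
    simp only [PySem.Set.contains_eq_listContains, List.contains_eq_mem, List.mem_append,
      Bool.not_eq_eq_eq_not, Bool.not_true, decide_eq_false_iff_not, not_or] at hnc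
    obtain ⟨haS, haN⟩ := hnc
    simp only [decide_eq_true_eq]
    intro hai
    exact haN (by rw [hN, List.mem_filter]; simp [PySem.Set.mem_ofList, hai, haS])
  rw [e1, e2a, e2b, e3a]
  simp

theorem pvAux (labels : List (List String)) : ∀ (rest p : List (List String)), labels = p ++ rest →
    PySem.Set.update (PySem.Set.ofList (flatten_list p))
      (rest.flatMap (fun i =>
        (PySem.Set.ofList (flatten_list labels)).filter (fun k => decide (k ∈ i)))) =
    PySem.Set.ofList (flatten_list labels)
  | [], p, h => by subst h; simp [PySem.Set.update_nil]
  | i :: t, p, h => by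
      subst h
      rw [List.flatMap_cons, PySem.Set.update_append, pvKey p t i]
      exact pvAux (p ++ i :: t) t (p ++ [i]) (by simp)

-- A's key order equals the first-occurrence order of the flattened input
theorem pvOfList_flatMap_filter (labels : List (List String)) :
    PySem.Set.ofList (labels.flatMap (fun i =>
        (PySem.Set.ofList (flatten_list labels)).filter (fun k => decide (k ∈ i)))) =
      PySem.Set.ofList (flatten_list labels) := by
  rw [← PySem.Set.update_nil_left]
  exact pvAux labels labels [] rfl

-- per document, the filtered unique list and the deduped document count each label alike
theorem pvCount_eq (labels : List (List String)) (k : String) :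
    (labels.flatMap (fun i =>
        (PySem.Set.ofList (flatten_list labels)).filter (fun x => decide (x ∈ i)))).count k =
      (labels.flatMap PySem.List.dedup).count k := by
  rw [List.count_flatMap, List.count_flatMap]
  apply congrArg List.sum
  rw [Function.comp_def, Function.comp_def]
  apply List.map_congr_left
  intro i hi
  have hR : (PySem.List.dedup i).count k = if k ∈ i then 1 else 0 := by
    rw [List.Nodup.count (PySem.List.nodup_dedup i)]
    simp
  have hnd : ((PySem.Set.ofList (flatten_list labels)).filter (fun x => decide (x ∈ i))).Nodup :=
    List.Nodup.filter _ (PySem.Set.nodup_ofList _)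
  rw [List.Nodup.count hnd, hR]
  by_cases hk : k ∈ i
  · have hku : k ∈ PySem.Set.ofList (flatten_list labels) := by
      rw [PySem.Set.mem_ofList]
      exact List.mem_flatMap.mpr ⟨i, hi, hk⟩
    simp [List.mem_filter, hku, hk]
  · simp [List.mem_filter, hk]

-- ===== VERDICT (by name: the statement is the Claim_ definition above) =====
theorem generate_dict_label_occ_in_docs_spec : Claim_equal_generate_dict_label_occ_in_docs := by
  intro labels _
  unfold Spec_generate_dict_label_occ_in_docs
  rw [pvA_eq_counter, pvB_eq_counter, PySem.Dict.items_counter, PySem.Dict.items_counter,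
    pvOfList_flatMap_filter, pvOfList_flatMap_dedup]
  exact List.map_congr_left (fun x _ => by rw [pvCount_eq])
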